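-- pv_equiv track=rewrite | github.com/8fqycwdt8v-oss/chemclaw | services/litellm_redactor/dynamic_patterns.py | _has_unbounded_quantifier
-- ===== SOURCE A (Python) =====
-- def _has_unbounded_quantifier(raw: str) -> str | None:
--     """Walk the raw regex and reject any ``+`` / ``*`` (greedy, lazy, or
--     possessive) and any ``{n,}`` form without an explicit upper bound.
--
--     Escape semantics: ``\\+`` and ``\\*`` are literal characters and
--     therefore safe; we skip the next character after every backslash.
--     Character classes (``[...]``) are walked through as a unit so a
--     literal ``+`` *inside* a class doesn't false-positive.
--     """
--     i = 0
--     n = len(raw)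
--     while i < n:
--         c = raw[i]
--         if c == "\\":
--             # Skip the escape and its target. ``\\+`` / ``\\*`` are
--             # literal characters — never quantifiers.
--             i += 2
--             continue
--         if c == "[":
--             # Walk through the class body. ``[+*]`` is a literal class
--             # of two chars, never a quantifier; we need to find the
--             # matching ``]`` (skipping ``\\]`` inside).
--             i += 1
--             while i < n and raw[i] != "]":
--                 if raw[i] == "\\" and i + 1 < n:
--                     i += 2
--                 else:
--                     i += 1
--             i += 1  # past the closing ']'
--             continue
--         if c in "+*":
--             return f"unbounded quantifier {c!r} at offset {i} (use bounded {{n,m}} form)"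
--         if c == "{":
--             close = raw.find("}", i)
--             if close != -1:
--                 quant = raw[i + 1 : close]
--                 # Reject {n,} (unbounded). Allow {n}, {n,m}.
--                 if "," in quant:
--                     parts = quant.split(",", 1)
--                     if len(parts) == 2 and parts[1].strip() == "":
--                         return (
--                             "open-ended quantifier "
--                             f"{{...,}} at offset {i} (use bounded {{n,m}} form)"
--                         )
--         i += 1
--     return None
-- ===== SOURCE B (Python) =====
-- def _has_unbounded_quantifier(raw: str) -> str | None:
--     """Two-phase scan: first build a length-preserving neutralized copy of
--     ``raw`` in which every escape pair and every character-class body is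
--     replaced by placeholder chars, then one flat pass over that copy flags
--     '+'/'*' and open-ended '{n,}' quantifiers (brace lookups use ``raw``)."""
--     n = len(raw)
--     buf = []
--     j = 0
--     while j < n:
--         c = raw[j]
--         if c == "\\":
--             # escape: the backslash and its target become placeholders
--             buf.append("\0")
--             j += 1
--             if j < n:
--                 buf.append("\0")
--                 j += 1
--         elif c == "[":
--             # character class: whole body (honoring '\]') becomes placeholders
--             buf.append("\0")
--             j += 1
--             while j < n and raw[j] != "]":
--                 if raw[j] == "\\" and j + 1 < n:
--                     buf += ["\0", "\0"]
--                     j += 2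
--                 else:
--                     buf.append("\0")
--                     j += 1
--             if j < n:
--                 buf.append("\0")
--                 j += 1
--         else:
--             buf.append(c)
--             j += 1
--     for i, c in enumerate(buf):
--         if c in "+*":
--             return f"unbounded quantifier {c!r} at offset {i} (use bounded {{n,m}} form)"
--         if c == "{":
--             close = raw.find("}", i)
--             if close != -1:
--                 quant = raw[i + 1 : close]
--                 if "," in quant and quant.split(",", 1)[1].strip() == "":
--                     return (
--                         "open-ended quantifier "
--                         f"{{...,}} at offset {i} (use bounded {{n,m}} form)"
--                     )
--     return None
-- ===== Notes on version B (the rewrite author's own statement) =====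
-- stated objective: alternative
-- what changed: Replaced the single stateful skip-as-you-scan loop by two phases: a length-preserving pass that neutralizes escapes and character-class bodies into placeholder chars, followed by a flat enumerate scan of the neutralized copy that flags quantifiers (brace contents read from the original string).
import Mathlib
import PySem

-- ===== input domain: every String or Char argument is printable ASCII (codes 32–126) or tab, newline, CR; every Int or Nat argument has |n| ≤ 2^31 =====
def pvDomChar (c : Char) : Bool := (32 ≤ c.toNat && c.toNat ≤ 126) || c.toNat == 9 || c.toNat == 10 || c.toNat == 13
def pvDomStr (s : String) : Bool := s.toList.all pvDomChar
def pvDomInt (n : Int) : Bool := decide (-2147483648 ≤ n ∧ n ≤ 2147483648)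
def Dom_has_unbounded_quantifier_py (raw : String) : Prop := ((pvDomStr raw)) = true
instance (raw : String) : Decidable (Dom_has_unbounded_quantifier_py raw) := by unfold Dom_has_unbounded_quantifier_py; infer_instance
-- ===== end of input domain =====

-- B replaces A's single stateful skip-as-you-scan loop by a length-preserving
-- neutralizing pass followed by a flat scan (objective: alternative decomposition).

-- ===== PORT A =====
-- shared message builders (both Pythons build the identical f-strings)
def pvMsgQuant (c : Char) (i : Nat) : String :=
  "unbounded quantifier '" ++ String.ofList [c] ++ "' at offset " ++ PySem.Int.toStr (i : Int)
    ++ " (use bounded {n,m} form)"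

def pvMsgOpen (i : Nat) : String :=
  "open-ended quantifier {...,} at offset " ++ PySem.Int.toStr (i : Int)
    ++ " (use bounded {n,m} form)"

-- the '{' branch (textually identical in A and in B): close = raw.find('}', i);
-- quant = raw[i+1:close]; ',' in quant and the piece after the first ',' strips to ''
def pvBraceHit (l : List Char) (i : Nat) : Bool :=
  let close := PySem.Chars.findFrom l ['}'] (i : Int) none
  if close ≠ -1 then
    let quant := PySem.List.slice l (some ((i : Int) + 1)) (some close)
    if PySem.Chars.isIn [','] quant then
      let parts := PySem.Chars.splitOnMax quant [','] 1
      -- parts[1] is guarded by len(parts) == 2, so getD is exact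
      decide (parts.length = 2) && (PySem.Chars.strip (parts.getD 1 []) == ([] : List Char))
    else false
  else false

-- inner while of A: walk the class body, return the loop's exit index
def aClass (l : List Char) (n i : Nat) : Nat :=
  if _h : i < n then
    if l.getD i ' ' = ']' then i
    else if l.getD i ' ' = '\\' ∧ i + 1 < n then aClass l n (i + 2)
    else aClass l n (i + 1)
  else i
termination_by n - i

theorem aClass_ge (l : List Char) (n i : Nat) : i ≤ aClass l n i := by
  unfold aClass
  split
  · split
    · exact le_refl _
    · split
      · have := aClass_ge l n (i + 2); omega
      · have := aClass_ge l n (i + 1); omega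
  · exact le_refl _
termination_by n - i

-- A's outer while loop (index form)
def aLoop (l : List Char) (n i : Nat) : Option String :=
  if _h : i < n then
    let c := l.getD i ' '   -- guarded by i < n, exact for raw[i]
    if c = '\\' then aLoop l n (i + 2)
    else if c = '[' then aLoop l n (aClass l n (i + 1) + 1)
    else if c = '+' ∨ c = '*' then some (pvMsgQuant c i)
    else if c = '{' then
      if pvBraceHit l i then some (pvMsgOpen i) else aLoop l n (i + 1)
    else aLoop l n (i + 1)
  else none
termination_by n - i
decreasing_by
  · omega
  · have := aClass_ge l n (i + 1); omega
  · omega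
  · omega

def has_unbounded_quantifier_py (raw : String) : Option String :=
  aLoop raw.toList raw.toList.length 0

-- ===== PORT B =====
def pvPad : Char := Char.ofNat 0    -- the "\0" placeholder

mutual
-- neutralizing pass (top level): escapes and classes become placeholders
def bNeutral : List Char → List Char
  | [] => []
  | c :: rest =>
    if c = '\\' then
      match rest with
      | [] => [pvPad]
      | _ :: r => pvPad :: pvPad :: bNeutral r
    else if c = '[' then pvPad :: bClass rest
    else c :: bNeutral rest
-- neutralizing pass, inside a character class (up to the matching ']')
def bClass : List Char → List Char
  | [] => []
  | c :: rest =>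
    if c = ']' then pvPad :: bNeutral rest
    else if c = '\\' then
      match rest with
      | [] => [pvPad]
      | _ :: r => pvPad :: pvPad :: bClass r
    else pvPad :: bClass rest
end

-- flat scan of the neutralized buffer; i tracks the offset into raw
def bScan (buf : List Char) (raw : List Char) (i : Nat) : Option String :=
  match buf with
  | [] => none
  | c :: rest =>
    if c = '+' ∨ c = '*' then some (pvMsgQuant c i)
    else if c = '{' then
      if pvBraceHit raw i then some (pvMsgOpen i) else bScan rest raw (i + 1)
    else bScan rest raw (i + 1)

def has_unbounded_quantifier_py_alt (raw : String) : Option String :=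
  bScan (bNeutral raw.toList) raw.toList 0

-- ===== PRECONDITION & SPEC =====
def Spec_has_unbounded_quantifier_py (raw : String) (out : Option String) : Prop := out = has_unbounded_quantifier_py_alt raw
instance (raw : String) (out : Option String) : Decidable (Spec_has_unbounded_quantifier_py raw out) := by unfold Spec_has_unbounded_quantifier_py; infer_instance

-- ===== CLAIM (what is proved, stated in full; the proofs are below) =====
def Claim_equal_has_unbounded_quantifier_py : Prop := ∀ (raw : String), Dom_has_unbounded_quantifier_py raw → Spec_has_unbounded_quantifier_py raw (has_unbounded_quantifier_py raw)

-- ===== LEMMAS AND PROOFS =====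

theorem bScan_pad (rest raw : List Char) (i : Nat) :
    bScan (pvPad :: rest) raw (i) = bScan rest raw (i + 1) := by
  simp [bScan, pvPad]

theorem bScan_replicate (m : Nat) (rest raw : List Char) (i : Nat) :
    bScan (List.replicate m pvPad ++ rest) raw i = bScan rest raw (i + m) := by
  induction m generalizing i with
  | zero => simp
  | succ k ih =>
    simp only [List.replicate_succ, List.cons_append, bScan_pad, ih]
    congr 1
    omega

theorem aClass_le (l : List Char) (n i : Nat) (h : i ≤ n) : aClass l n i ≤ n := by
  unfold aClass
  split
  · split
    · omega
    · split
      · exact aClass_le l n (i + 2) (by omega)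
      · exact aClass_le l n (i + 1) (by omega)
  · omega
termination_by n - i

theorem bClass_eq (l : List Char) (i : Nat) :
    bClass (l.drop i) =
      List.replicate (min (aClass l l.length i + 1) l.length - i) pvPad
        ++ bNeutral (l.drop (aClass l l.length i + 1)) := by
  by_cases h : i < l.length
  · have hdrop : l.drop i = l[i] :: l.drop (i + 1) := List.drop_eq_getElem_cons h
    have hgetD : l.getD i ' ' = l[i] := List.getD_eq_getElem l ' ' h
    rw [hdrop]
    unfold aClass
    rw [dif_pos h, hgetD]
    by_cases hc : l[i] = ']'
    · rw [if_pos hc]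
      have hm : min (i + 1) l.length - i = 1 := by omega
      rw [hm, bClass.eq_def]
      simp [hc]
    · rw [if_neg hc]
      by_cases hb : l[i] = '\\' ∧ i + 1 < l.length
      · rw [if_pos hb]
        have hdrop2 : l.drop (i + 1) = l[i + 1] :: l.drop (i + 2) :=
          List.drop_eq_getElem_cons hb.2
        have ih := bClass_eq l (i + 2)
        have hk := aClass_ge l l.length (i + 2)
        have hm : min (aClass l l.length (i + 2) + 1) l.length - i
            = (min (aClass l l.length (i + 2) + 1) l.length - (i + 2)) + 2 := by omega
        rw [hm, hdrop2, bClass.eq_def]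
        simp only [hb.1, List.replicate_succ, List.cons_append, ih]
        simp
      · rw [if_neg hb]
        have ih := bClass_eq l (i + 1)
        have hk := aClass_ge l l.length (i + 1)
        have hm : min (aClass l l.length (i + 1) + 1) l.length - i
            = (min (aClass l l.length (i + 1) + 1) l.length - (i + 1)) + 1 := by omega
        rw [hm]
        rcases Decidable.em (l[i] = '\\') with hbs | hbs
        · -- lone backslash at the very end: rest is empty
          have h3 : ¬ (i + 1 < l.length) := fun hh => hb ⟨hbs, hh⟩
          have hnil : l.drop (i + 1) = [] := List.drop_eq_nil_of_le (by omega)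
          have hae : aClass l l.length (i + 1) = i + 1 := by
            unfold aClass; rw [dif_neg h3]
          rw [hnil, bClass.eq_def, hae]
          have hnil2 : l.drop (i + 1 + 1) = [] := List.drop_eq_nil_of_le (by omega)
          have hm0 : min (i + 1 + 1) l.length - (i + 1) = 0 := by omega
          rw [hm0, hnil2]
          simp [hbs, bNeutral]
        · rw [bClass.eq_def]
          simp only [List.replicate_succ, List.cons_append, ih]
          simp [hc, hbs]
  · have hnil : l.drop i = [] := List.drop_eq_nil_of_le (by omega)
    unfold aClass
    rw [dif_neg h, hnil]
    have hm : min (i + 1) l.length - i = 0 := by omega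
    have hnil2 : l.drop (i + 1) = [] := List.drop_eq_nil_of_le (by omega)
    rw [hm, hnil2]
    simp [bClass, bNeutral]
termination_by l.length - i

theorem main_lemma (l : List Char) (i : Nat) :
    aLoop l l.length i = bScan (bNeutral (l.drop i)) l i := by
  by_cases h : i < l.length
  · have hdrop : l.drop i = l[i] :: l.drop (i + 1) := List.drop_eq_getElem_cons h
    have hgetD : l.getD i ' ' = l[i] := List.getD_eq_getElem l ' ' h
    rw [hdrop]
    unfold aLoop
    rw [dif_pos h]
    simp only [hgetD]
    by_cases hbs : l[i] = '\\'
    · rw [if_pos hbs]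
      by_cases h2 : i + 1 < l.length
      · have hdrop2 : l.drop (i + 1) = l[i + 1] :: l.drop (i + 2) := List.drop_eq_getElem_cons h2
        have ih := main_lemma l (i + 2)
        rw [hdrop2, bNeutral.eq_def]
        simp [hbs, bScan_pad, ih]
      · have hnil : l.drop (i + 1) = [] := List.drop_eq_nil_of_le (by omega)
        rw [hnil, bNeutral.eq_def]
        simp [hbs, bScan_pad]
        unfold aLoop
        rw [dif_neg (by omega : ¬ i + 2 < l.length)]
        simp [bScan]
    · rw [if_neg hbs]
      by_cases hcl : l[i] = '['
      · rw [if_pos hcl]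
        have hk := aClass_ge l l.length (i + 1)
        have hkn := aClass_le l l.length (i + 1) (by omega)
        have hcls := bClass_eq l (i + 1)
        rw [bNeutral.eq_def]
        simp [hcl, hcls, bScan_pad, bScan_replicate]
        by_cases hfin : aClass l l.length (i + 1) < l.length
        · have hm : i + 1 + (min (aClass l l.length (i + 1) + 1) l.length - (i + 1))
              = aClass l l.length (i + 1) + 1 := by omega
          rw [hm]
          exact main_lemma l (aClass l l.length (i + 1) + 1)
        · have hnil : l.drop (aClass l l.length (i + 1) + 1) = [] :=
            List.drop_eq_nil_of_le (by omega)
          rw [hnil]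
          unfold aLoop
          rw [dif_neg (by omega : ¬ aClass l l.length (i + 1) + 1 < l.length)]
          simp [bNeutral, bScan]
      · rw [if_neg hcl]
        by_cases hq : l[i] = '+' ∨ l[i] = '*'
        · rw [if_pos hq]
          rw [bNeutral.eq_def]
          simp only [if_neg hbs, if_neg hcl, bScan, if_pos hq]
        · rw [if_neg hq]
          have ih := main_lemma l (i + 1)
          by_cases hbr : l[i] = '{'
          · rw [if_pos hbr]
            rw [bNeutral.eq_def]
            simp only [if_neg hbs, if_neg hcl, bScan, if_neg hq, if_pos hbr, ih]
          · rw [if_neg hbr]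
            rw [bNeutral.eq_def]
            simp only [if_neg hbs, if_neg hcl, bScan, if_neg hq, if_neg hbr, ih]
  · have hnil : l.drop i = [] := List.drop_eq_nil_of_le (by omega)
    unfold aLoop
    rw [dif_neg h, hnil]
    simp [bNeutral, bScan]
termination_by l.length - i
decreasing_by
  all_goals omega

-- ===== VERDICT (by name: the statement is the Claim_ definition above) =====
theorem has_unbounded_quantifier_py_spec : Claim_equal_has_unbounded_quantifier_py := by
  intro raw _
  unfold Spec_has_unbounded_quantifier_py has_unbounded_quantifier_py has_unbounded_quantifier_py_alt
  simpa using main_lemma raw.toList 0
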